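-- pv_equiv track=rewrite | github.com/PipeG222/Technical-Test-Cadena | python/prime_sum.py | sum_of_primes
-- ===== SOURCE A (Python) =====
-- from typing import Iterable
--
-- def _sieve(limit: int) -> list[bool]:
--     """Return a boolean array where index i is True iff i is prime."""
--     if limit < 2:
--         return [False] * max(limit + 1, 2)
--
--     is_prime: list[bool] = [True] * (limit + 1)
--     is_prime[0] = is_prime[1] = False
--
--     for i in range(2, int(limit**0.5) + 1):
--         if is_prime[i]:
--             is_prime[i * i :: i] = [False] * len(is_prime[i * i :: i])
--
--     return is_prime
--
-- def sum_of_primes(numbers: Iterable[object]) -> int: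
--     """Return the sum of all prime numbers in *numbers*.
--
--     Parameters
--     ----------
--     numbers:
--         Any iterable of integers.  Non-integer items and negative values
--         are rejected with informative exceptions.
--
--     Returns
--     -------
--     int
--         Sum of prime numbers found in the input.  Returns 0 when the
--         iterable is empty or contains no primes.
--
--     Raises
--     ------
--     TypeError
--         If *numbers* is not iterable or contains non-integer elements.
--     ValueError
--         If any integer in *numbers* is negative (primes are positive by
--         definition, but a negative value likely indicates a data problem
--         worth surfacing rather than silently skipping).
--
--     Examples
--     --------
--     >>> sum_of_primes([1, 2, 3, 4, 5, 6, 7, 8, 9, 10])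
--     17
--     >>> sum_of_primes([])
--     0
--     >>> sum_of_primes([4, 6, 8, 9])
--     0
--     """
--     if not hasattr(numbers, "__iter__"):
--         raise TypeError(
--             f"Expected an iterable, got {type(numbers).__name__!r}."
--         )
--
--     # Materialise once so we can run two passes (validate then compute).
--     items: list[object] = list(numbers)
--
--     # --- Validation pass ---------------------------------------------------
--     for idx, item in enumerate(items):
--         if not isinstance(item, (int, bool)):  # bool is a subclass of int
--             raise TypeError(
--                 f"All elements must be integers; got {type(item).__name__!r} "
--                 f"at index {idx} (value={item!r})."
--             )
--         if isinstance(item, bool):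
--             raise TypeError(
--                 f"Boolean values are not valid integers for this function; "
--                 f"got {item!r} at index {idx}."
--             )
--         if item < 0:
--             raise ValueError(
--                 f"Negative integers are not valid input; "
--                 f"got {item!r} at index {idx}."
--             )
--
--     if not items:
--         return 0
--
--     int_items: list[int] = items  # type: ignore[assignment]
--     max_val: int = max(int_items)
--
--     # --- Sieve pass (avoids repeated sqrt checks for large lists) ----------
--     sieve = _sieve(max_val)
--
--     total = 0
--     for n in int_items:
--         if n <= max_val and sieve[n]:
--             total += n
--
--     return total
-- ===== SOURCE B (Python) =====
-- from typing import Iterable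
--
--
-- def _is_prime(n: int) -> bool:
--     """Trial division: True iff n is prime."""
--     if n < 2:
--         return False
--     i = 2
--     while i * i <= n:
--         if n % i == 0:
--             return False
--         i += 1
--     return True
--
--
-- def sum_of_primes(numbers: Iterable[object]) -> int:
--     """Return the sum of all prime numbers in *numbers* (single pass,
--     per-element trial division instead of a sieve)."""
--     if not hasattr(numbers, "__iter__"):
--         raise TypeError(
--             f"Expected an iterable, got {type(numbers).__name__!r}."
--         )
--
--     total = 0
--     for idx, item in enumerate(numbers):
--         if not isinstance(item, (int, bool)):
--             raise TypeError(
--                 f"All elements must be integers; got {type(item).__name__!r} "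
--                 f"at index {idx} (value={item!r})."
--             )
--         if isinstance(item, bool):
--             raise TypeError(
--                 f"Boolean values are not valid integers for this function; "
--                 f"got {item!r} at index {idx}."
--             )
--         if item < 0:
--             raise ValueError(
--                 f"Negative integers are not valid input; "
--                 f"got {item!r} at index {idx}."
--             )
--         if _is_prime(item):
--             total += item
--     return total
-- ===== Notes on version B (the rewrite author's own statement) =====
-- stated objective: simpler
-- what changed: Replaced the two-pass sieve (materialise, validate, max, boolean sieve array, summing scan) by a single pass that validates each element and adds it if per-element trial division says it is prime; the _sieve helper and max_val disappear.
import Mathlib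
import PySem

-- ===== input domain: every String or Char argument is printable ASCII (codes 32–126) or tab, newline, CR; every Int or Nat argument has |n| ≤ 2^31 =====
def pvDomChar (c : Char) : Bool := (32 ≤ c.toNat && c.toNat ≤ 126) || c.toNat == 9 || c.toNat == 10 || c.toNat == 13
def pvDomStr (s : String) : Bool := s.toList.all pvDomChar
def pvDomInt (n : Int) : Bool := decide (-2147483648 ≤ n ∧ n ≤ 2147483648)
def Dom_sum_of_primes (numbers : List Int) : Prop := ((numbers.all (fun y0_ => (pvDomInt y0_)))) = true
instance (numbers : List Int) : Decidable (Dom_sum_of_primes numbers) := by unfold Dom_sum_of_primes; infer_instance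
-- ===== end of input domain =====

-- B replaces A's materialise/validate/max/sieve/scan pipeline by a single pass that sums
-- the elements passing per-element trial division (objective: simpler — _sieve and max_val disappear).

-- ===== PORT A =====

-- Python's bool list with O(1) item read/assignment is carried as `Array Bool`;
-- these two helpers are the exact Python indexing semantics on it.

-- `a[i]` with a default, Python index semantics (negative i counts from the end;
-- the default is only returned out of range, where Python would raise — every
-- read the ports perform is in range on the admitted inputs).
def pvArrGetD (a : Array Bool) (i : Int) (d : Bool) : Bool :=
  if 0 ≤ i ∧ i < a.size then a[i.toNat]?.getD d
  else if -(a.size : Int) ≤ i ∧ i < 0 then a[(i + a.size).toNat]?.getD d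
  else d

-- `a[i] = v` for the indices 0 ≤ i < size the ports generate (out of range: no-op).
def pvArrSetD (a : Array Bool) (i : Int) (v : Bool) : Array Bool :=
  a.setIfInBounds i.toNat v

-- Python slice assignment `is_prime[start::step] = [False] * …`: set every index
-- start, start+step, … below size to False (in A start = i*i ≥ 0 and step = i ≥ 2).
def pvMark (arr : Array Bool) (start step : Int) : Array Bool :=
  (PySem.List.pyRange start (arr.size : Int) step).foldl
    (fun a j => pvArrSetD a j false) arr

-- port of _sieve; `int(limit**0.5)` is ported as Nat.sqrt, exact on the stated domain
-- 0 ≤ limit ≤ 2^31 (CPython's `limit**0.5` agrees with math.isqrt on that whole range).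
def pvSieve (limit : Int) : Array Bool :=
  if limit < 2 then Array.replicate (max (limit + 1) 2).toNat false
  else
    let a0 := pvArrSetD (pvArrSetD
      (Array.replicate (limit + 1).toNat true) (0 : Int) false) (1 : Int) false
    (PySem.List.pyRange 2 ((Nat.sqrt limit.toNat : Int) + 1) 1).foldl
      (fun a i => if pvArrGetD a i false then pvMark a (i * i) i else a) a0

-- A's validation loop raises TypeError/ValueError: over `List Int` only the negative
-- check can fire, and Pre_ excludes exactly those inputs, so the loop ports to nothing.
def sum_of_primes (numbers : List Int) : Int :=
  if numbers = [] then 0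
  else
    match PySem.List.max? numbers id with
    | none => 0
    | some maxVal =>
      let sieve := pvSieve maxVal
      numbers.foldl
        (fun total n =>
          if n ≤ maxVal ∧ pvArrGetD sieve n false then total + n else total) 0

-- ===== PORT B =====

-- `while i * i <= n: if n % i == 0: return False; i += 1; return True`
def pvTrial (n i : Int) : Bool :=
  if h : i * i ≤ n then
    if PySem.Int.mod n i = 0 then false else pvTrial n (i + 1)
  else true
termination_by (n + 1 - i).toNat
decreasing_by
  have hi : i ≤ n := by nlinarith [sq_nonneg i]
  omega

def pvIsPrime (n : Int) : Bool := if n < 2 then false else pvTrial n 2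

def sum_of_primes_alt (numbers : List Int) : Int :=
  numbers.foldl (fun total n => if pvIsPrime n then total + n else total) 0

-- ===== PRECONDITION & SPEC =====
-- Pre_ excludes inputs containing a negative integer: on those Python A raises
-- ValueError in its validation pass instead of returning (B raises it too).
def Pre_sum_of_primes (numbers : List Int) : Prop := ∀ n ∈ numbers, 0 ≤ n
instance (numbers : List Int) : Decidable (Pre_sum_of_primes numbers) := by
  unfold Pre_sum_of_primes; infer_instance

def pvWitness_sum_of_primes : List Int := [1, 2, 3, 4, 5, 6, 7, 8, 9, 10]

def Spec_sum_of_primes (numbers : List Int) (out : Int) : Prop := out = sum_of_primes_alt numbers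
instance (numbers : List Int) (out : Int) : Decidable (Spec_sum_of_primes numbers out) := by
  unfold Spec_sum_of_primes; infer_instance

-- ===== CLAIM (what is proved, stated in full; the proofs are below) =====
def Claim_equal_sum_of_primes : Prop := ∀ (numbers : List Int), Dom_sum_of_primes numbers → Pre_sum_of_primes numbers → Spec_sum_of_primes numbers (sum_of_primes numbers)

-- ===== LEMMAS AND PROOFS =====

theorem pvTrial_eq_true_iff (n : Int) : ∀ (i : Int), 2 ≤ i →
    (pvTrial n i = true ↔ ∀ j : Int, i ≤ j → j * j ≤ n → ¬ j ∣ n) := by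
  have key : ∀ (fuel : Nat) (i : Int), (n + 1 - i).toNat ≤ fuel → 2 ≤ i →
      (pvTrial n i = true ↔ ∀ j : Int, i ≤ j → j * j ≤ n → ¬ j ∣ n) := by
    intro fuel
    induction fuel with
    | zero =>
      intro i hle hi
      have hni : n < i := by omega
      have hgt : ¬ i * i ≤ n := by nlinarith
      rw [pvTrial]
      simp only [hgt, dif_neg, not_false_iff]
      constructor
      · intro _ j hij hjj
        exfalso
        have : 2 ≤ j := by omega
        nlinarith
      · intro _; trivial
    | succ f IH =>
      intro i hle hi
      rw [pvTrial]
      by_cases h : i * i ≤ n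
      · simp only [h, dif_pos]
        by_cases hd : PySem.Int.mod n i = 0
        · simp only [hd, if_pos]
          have hdvd : i ∣ n := (PySem.Int.mod_eq_zero_iff_dvd n i).mp hd
          constructor
          · intro hfalse; exact absurd hfalse (by simp)
          · intro hall; exact absurd hdvd (hall i le_rfl h)
        · simp only [hd, if_neg, not_false_iff]
          have hin : i ≤ n := by nlinarith
          rw [IH (i + 1) (by omega) (by omega)]
          constructor
          · intro hall j hij hjj hdj
            rcases eq_or_lt_of_le hij with heq | hlt
            · subst heq; exact hd ((PySem.Int.mod_eq_zero_iff_dvd n i).mpr hdj)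
            · exact hall j (by omega) hjj hdj
          · intro hall j hij hjj; exact hall j (by omega) hjj
      · simp only [h, dif_neg, not_false_iff]
        constructor
        · intro _ j hij hjj
          exfalso
          have : 2 ≤ j := by omega
          nlinarith
        · intro _; trivial
  intro i hi
  exact key (n + 1 - i).toNat i le_rfl hi

theorem pvIsPrime_eq (n : Int) (hn : 0 ≤ n) : pvIsPrime n = decide (Nat.Prime n.toNat) := by
  unfold pvIsPrime
  by_cases h : n < 2
  · have h01 : n.toNat = 0 ∨ n.toNat = 1 := by omega
    rcases h01 with h1 | h1 <;> simp [h, h1, Nat.not_prime_zero, Nat.not_prime_one]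
  · push Not at h
    rw [if_neg (by omega)]
    have hm : 2 ≤ n.toNat := by omega
    have hnm : ((n.toNat : Nat) : Int) = n := Int.toNat_of_nonneg hn
    have hiff := pvTrial_eq_true_iff n 2 (by norm_num)
    by_cases hp : Nat.Prime n.toNat
    · simp only [hp, decide_true]
      rw [hiff]
      intro j h2j hjj hdj
      have hjd : j.toNat ∣ n.toNat := by
        rw [← Int.natCast_dvd_natCast, hnm, Int.toNat_of_nonneg (by omega : (0:Int) ≤ j)]
        exact hdj
      rcases (Nat.Prime.eq_one_or_self_of_dvd hp j.toNat hjd) with h1 | h1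
      · omega
      · have hje : j = n := by omega
        subst hje; nlinarith
    · simp only [hp, decide_false]
      rw [Bool.eq_false_iff, Ne, hiff]
      push Not
      refine ⟨(n.toNat.minFac : Int), ?_, ?_, ?_⟩
      · exact_mod_cast (Nat.minFac_prime (by omega : n.toNat ≠ 1)).two_le
      · have := Nat.minFac_sq_le_self (by omega : 0 < n.toNat) hp
        have : n.toNat.minFac * n.toNat.minFac ≤ n.toNat := by nlinarith [this]
        calc ((n.toNat.minFac : Int)) * n.toNat.minFac = ((n.toNat.minFac * n.toNat.minFac : Nat) : Int) := by push_cast; ring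
          _ ≤ ((n.toNat : Nat) : Int) := by exact_mod_cast this
          _ = n := hnm
      · rw [← hnm]; exact_mod_cast Nat.minFac_dvd n.toNat

theorem pvArrGetD_natCast (a : Array Bool) (k : Nat) (d : Bool) :
    pvArrGetD a ((k : Nat) : Int) d = a[k]?.getD d := by
  unfold pvArrGetD
  by_cases h : k < a.size
  · rw [if_pos ⟨by omega, by exact_mod_cast h⟩, Int.toNat_natCast]
  · rw [if_neg (by omega), if_neg (by omega)]
    rw [Array.getElem?_eq_none (by omega)]
    rfl

theorem foldl_setFalse_size (cs : List Int) (arr : Array Bool) :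
    (cs.foldl (fun a j => pvArrSetD a j false) arr).size = arr.size := by
  induction cs generalizing arr with
  | nil => rfl
  | cons c cs ih => rw [List.foldl_cons, ih]; unfold pvArrSetD; rw [Array.size_setIfInBounds]

theorem foldl_setFalse_getD (cs : List Int) (arr : Array Bool) (hcs : ∀ j ∈ cs, 0 ≤ j) (k : Nat) :
    (cs.foldl (fun a j => pvArrSetD a j false) arr)[k]?.getD false
      = if (k : Int) ∈ cs then false else arr[k]?.getD false := by
  induction cs generalizing arr with
  | nil => simp
  | cons c cs ih =>
    have hc : 0 ≤ c := hcs c (List.mem_cons_self)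
    rw [List.foldl_cons, ih _ (fun j hj => hcs j (List.mem_cons_of_mem _ hj))]
    by_cases hmem : (k : Int) ∈ cs
    · simp [hmem]
    · simp only [hmem, if_false, List.mem_cons, or_false]
      unfold pvArrSetD
      rw [Array.getElem?_setIfInBounds]
      by_cases hkc : (k : Int) = c
      · have hkk : c.toNat = k := by omega
        rw [if_pos hkk, if_pos hkc]
        split
        · rfl
        · rfl
      · rw [if_neg (by omega), if_neg hkc]

theorem pvMark_size (arr : Array Bool) (start step : Int) :
    (pvMark arr start step).size = arr.size := by
  unfold pvMark; exact foldl_setFalse_size _ _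

theorem pvMark_getD (arr : Array Bool) (start step : Int) (h0 : 0 ≤ start) (hs : 0 < step) (k : Nat) :
    (pvMark arr start step)[k]?.getD false
      = if start ≤ (k : Int) ∧ (k : Int) < arr.size ∧ step ∣ (k : Int) - start then false
        else arr[k]?.getD false := by
  unfold pvMark
  rw [foldl_setFalse_getD _ _ (fun j hj => by
    have := (PySem.List.mem_pyRange_iff_of_pos hs j).mp hj
    omega)]
  congr 1
  rw [PySem.List.mem_pyRange_iff_of_pos hs]

def pvGood (j k : Nat) : Prop := ∀ p : Nat, p < j → Nat.Prime p → ¬(p ∣ k ∧ p * p ≤ k)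

theorem pvGood_two (k : Nat) : pvGood 2 k := by
  intro p hp hpp
  have := hpp.two_le
  omega

theorem pvGood_self_iff_prime (j : Nat) (hj : 2 ≤ j) : pvGood j j ↔ Nat.Prime j := by
  constructor
  · intro hg
    by_contra hnp
    have hp := Nat.minFac_prime (by omega : j ≠ 1)
    have hd := Nat.minFac_dvd j
    have hsq : j.minFac ^ 2 ≤ j := Nat.minFac_sq_le_self (by omega) hnp
    have h2 := hp.two_le
    exact hg j.minFac (by nlinarith) hp ⟨hd, by nlinarith⟩
  · intro hp p hpj hpp ⟨hdvd, hsq⟩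
    rcases hp.eq_one_or_self_of_dvd p hdvd with h1 | h1
    · exact absurd h1 (by have := hpp.two_le; omega)
    · omega

theorem pvGood_succ (j k : Nat) :
    pvGood (j + 1) k ↔ pvGood j k ∧ (Nat.Prime j → ¬(j ∣ k ∧ j * j ≤ k)) := by
  constructor
  · intro h
    exact ⟨fun p hp => h p (by omega), fun hp => h j (by omega) hp⟩
  · rintro ⟨h1, h2⟩ p hp hpp
    rcases Nat.lt_or_ge p j with hlt | hge
    · exact h1 p hlt hpp
    · have : p = j := by omega
      subst this
      exact h2 hpp

theorem pvSieve_inv (limit : Int) (h2 : 2 ≤ limit) :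
    ∀ (j : Nat), 2 ≤ j → j ≤ Nat.sqrt limit.toNat + 1 →
      ((PySem.List.pyRange 2 (j : Int) 1).foldl
          (fun a i => if pvArrGetD a i false then pvMark a (i * i) i else a)
          (pvArrSetD (pvArrSetD
            (Array.replicate (limit + 1).toNat true) (0 : Int) false) (1 : Int) false)).size
          = limit.toNat + 1 ∧
      ∀ k : Nat, k ≤ limit.toNat →
        ((PySem.List.pyRange 2 (j : Int) 1).foldl
          (fun a i => if pvArrGetD a i false then pvMark a (i * i) i else a)
          (pvArrSetD (pvArrSetD
            (Array.replicate (limit + 1).toNat true) (0 : Int) false) (1 : Int) false))[k]?.getD false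
          = decide (2 ≤ k ∧ ∀ p : Nat, p < j → Nat.Prime p → ¬(p ∣ k ∧ p * p ≤ k)) := by
  intro j hj
  induction j, hj using Nat.le_induction with
  | base =>
    intro _
    have hnil : PySem.List.pyRange 2 ((2 : Nat) : Int) 1 = [] := by
      rw [PySem.List.pyRange_one_eq_nil (by norm_num)]
    rw [hnil, List.foldl_nil]
    unfold pvArrSetD
    constructor
    · simp only [Array.size_setIfInBounds, Array.size_replicate]; omega
    · intro k hk
      have hkL : k < (limit + 1).toNat := by omega
      rw [Array.getElem?_setIfInBounds, Array.getElem?_setIfInBounds, Array.getElem?_replicate]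
      rcases Nat.lt_or_ge k 2 with hk2 | hk2
      · interval_cases k <;>
          simp [Array.size_setIfInBounds, Array.size_replicate, hkL]
      · rw [if_neg (by omega), if_neg (by omega), if_pos hkL]
        have : (2 ≤ k ∧ ∀ p : Nat, p < 2 → Nat.Prime p → ¬(p ∣ k ∧ p * p ≤ k)) :=
          ⟨hk2, pvGood_two k⟩
        exact (decide_eq_true this).symm
  | succ j hj ih =>
    intro hjs
    have hs : j ≤ Nat.sqrt limit.toNat := by omega
    obtain ⟨ihl, ihg⟩ := ih (by omega)
    have hsplit : PySem.List.pyRange 2 ((j + 1 : Nat) : Int) 1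
        = PySem.List.pyRange 2 (j : Int) 1 ++ [(j : Int)] := by
      have : ((j + 1 : Nat) : Int) = (j : Int) + 1 := by push_cast; ring
      rw [this, PySem.List.pyRange_one_succ_right (by exact_mod_cast hj.trans (le_refl j) : (2:Int) ≤ (j:Int))]
    rw [hsplit, List.foldl_append, List.foldl_cons, List.foldl_nil]
    have hjlim : j ≤ limit.toNat := le_trans hs (Nat.sqrt_le_self _)
    have haj : pvArrGetD
        ((PySem.List.pyRange 2 (j : Int) 1).foldl
          (fun a i => if pvArrGetD a i false then pvMark a (i * i) i else a)
          (pvArrSetD (pvArrSetD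
            (Array.replicate (limit + 1).toNat true) (0 : Int) false) (1 : Int) false))
        (j : Int) false = decide (Nat.Prime j) := by
      rw [pvArrGetD_natCast, ihg j hjlim, decide_eq_decide]
      constructor
      · exact fun h => (pvGood_self_iff_prime j hj).mp h.2
      · exact fun h => ⟨hj, (pvGood_self_iff_prime j hj).mpr h⟩
    by_cases hp : Nat.Prime j
    · rw [haj]
      simp only [hp, decide_true, if_true]
      constructor
      · rw [pvMark_size, ihl]
      · intro k hk
        rw [pvMark_getD _ _ _ (by positivity) (by exact_mod_cast (by omega : 0 < j)) k]
        have hlen : (((PySem.List.pyRange 2 (j : Int) 1).foldl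
            (fun a i => if pvArrGetD a i false then pvMark a (i * i) i else a)
            (pvArrSetD (pvArrSetD
              (Array.replicate (limit + 1).toNat true) (0 : Int) false) (1 : Int) false)).size : Int)
            = (limit.toNat : Int) + 1 := by rw [ihl]; omega
        rw [hlen, ihg k hk]
        have hdveq : ((j : Int) ∣ (k : Int) - (j : Int) * (j : Int)) ↔ j ∣ k := by
          constructor
          · intro h
            have h2' : (j : Int) ∣ (k : Int) := by
              have := dvd_add h (dvd_mul_right (j : Int) (j : Int))
              simpa using this
            exact_mod_cast h2'
          · intro h
            exact dvd_sub (by exact_mod_cast h) (dvd_mul_right _ _)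
        by_cases hmark : j * j ≤ k ∧ j ∣ k
        · rw [if_pos ⟨by exact_mod_cast hmark.1, by omega, hdveq.mpr hmark.2⟩]
          symm
          simp only [decide_eq_false_iff_not]
          rintro ⟨-, hgood⟩
          exact hgood j (by omega) hp ⟨hmark.2, hmark.1⟩
        · rw [if_neg (by
            rintro ⟨hsq, -, hdv⟩
            exact hmark ⟨by exact_mod_cast hsq, hdveq.mp hdv⟩)]
          rw [decide_eq_decide]
          constructor
          · rintro ⟨hk2, hg⟩
            refine ⟨hk2, (pvGood_succ j k).mpr ⟨hg, fun _ hc => hmark ⟨hc.2, hc.1⟩⟩⟩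
          · rintro ⟨hk2, hg⟩
            exact ⟨hk2, fun p hpj hpp => hg p (by omega) hpp⟩
    · rw [haj]
      simp only [hp, decide_false]
      rw [if_neg (by simp)]
      refine ⟨ihl, fun k hk => ?_⟩
      rw [ihg k hk, decide_eq_decide]
      constructor
      · rintro ⟨hk2, hg⟩
        refine ⟨hk2, fun p hpj hpp => ?_⟩
        rcases Nat.lt_or_ge p j with hlt | hge
        · exact hg p hlt hpp
        · have : p = j := by omega
          subst this
          exact absurd hpp hp
      · rintro ⟨hk2, hg⟩
        exact ⟨hk2, fun p hpj hpp => hg p (by omega) hpp⟩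

theorem pvSieve_getD (limit : Int) (h : 0 ≤ limit) (k : Nat) (hk : k ≤ limit.toNat) :
    (pvSieve limit)[k]?.getD false = decide (Nat.Prime k) := by
  by_cases hl : limit < 2
  · unfold pvSieve
    rw [if_pos hl]
    have hnp : ¬ Nat.Prime k := by
      intro hp
      have := hp.two_le
      omega
    rw [Array.getElem?_replicate]
    simp only [hnp, decide_false]
    split <;> rfl
  · push Not at hl
    have hs1 : 1 ≤ Nat.sqrt limit.toNat := Nat.le_sqrt.mpr (by omega)
    obtain ⟨-, hg⟩ := pvSieve_inv limit hl (Nat.sqrt limit.toNat + 1) (by omega) le_rfl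
    unfold pvSieve
    rw [if_neg (by omega)]
    have hcast : ((Nat.sqrt limit.toNat + 1 : Nat) : Int) = ((Nat.sqrt limit.toNat : Int) + 1) := by
      push_cast; ring
    rw [← hcast]
    rw [hg k hk, decide_eq_decide]
    constructor
    · rintro ⟨hk2, hgood⟩
      by_contra hnp
      have hp := Nat.minFac_prime (by omega : k ≠ 1)
      have hd := Nat.minFac_dvd k
      have hsq : k.minFac ^ 2 ≤ k := Nat.minFac_sq_le_self (by omega) hnp
      have hle : k.minFac ≤ Nat.sqrt limit.toNat := Nat.le_sqrt.mpr (by nlinarith)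
      exact hgood k.minFac (by omega) hp ⟨hd, by nlinarith⟩
    · intro hp
      refine ⟨hp.two_le, fun p hpj hpp ⟨hdvd, hsq⟩ => ?_⟩
      rcases hp.eq_one_or_self_of_dvd p hdvd with h1 | h1
      · exact absurd h1 (by have := hpp.two_le; omega)
      · subst h1
        have := hp.two_le
        nlinarith

theorem sum_of_primes_eq (numbers : List Int) (hpre : ∀ n ∈ numbers, 0 ≤ n) :
    sum_of_primes numbers = sum_of_primes_alt numbers := by
  unfold sum_of_primes sum_of_primes_alt
  by_cases hnil : numbers = []
  · subst hnil; simp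
  · rw [if_neg hnil]
    obtain ⟨x, t, rfl⟩ := List.exists_cons_of_ne_nil hnil
    rcases hmx : PySem.List.max? (x :: t) id with _ | m
    · exact absurd ((PySem.List.max?_eq_none_iff _ _).mp hmx) hnil
    · have hmem : m ∈ x :: t := PySem.List.max?_mem hmx
      have hm0 : 0 ≤ m := hpre m hmem
      apply PySem.List.foldl_congr_mem
      intro acc n hn
      have h0n := hpre n hn
      have hnm : n ≤ m := PySem.List.max?_isMax hmx n hn
      have hget : pvArrGetD (pvSieve m) n false = pvIsPrime n := by
        have hkk : n.toNat ≤ m.toNat := by omega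
        rw [show n = ((n.toNat : Nat) : Int) by omega, pvArrGetD_natCast,
            pvIsPrime_eq _ (by positivity)]
        rw [Int.toNat_natCast]
        exact pvSieve_getD m hm0 n.toNat hkk
      rw [hget]
      by_cases hpn : pvIsPrime n
      · rw [if_pos ⟨hnm, hpn⟩, if_pos hpn]
      · rw [if_neg (fun hc => hpn hc.2), if_neg hpn]

-- ===== VERDICT (by name: the statement is the Claim_ definition above) =====
theorem sum_of_primes_spec : Claim_equal_sum_of_primes := by
  intro numbers _hdom hpre
  exact sum_of_primes_eq numbers hpre
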